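-- pv_equiv track=rewrite | github.com/ShelDenis/OMGTU | Olimpic_tasks/tau_kita.py | decode_word
-- ===== SOURCE A (Python) =====
-- def decode_word(word):
--     translated_w = ''
--     plus = 1
--     side = -1
--     ind = len(word) // 2
--     translated_w += word[ind]
--     for i in range(len(word) - 1):
--         translated_w += word[ind + plus * side]
--         if i % 2 == 1:
--             plus += 1
--         side *= -1
--     return translated_w
-- ===== SOURCE B (Python) =====
-- def decode_word(word):
--     ind = len(word) // 2
--     mid = word[ind]
--     left = word[:ind][::-1]
--     right = word[ind + 1:]
--     res = [mid]
--     for l, r in zip(left, right):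
--         res.append(l)
--         res.append(r)
--     if len(left) > len(right):
--         res.append(left[-1])
--     return ''.join(res)
-- ===== Notes on version B (the rewrite author's own statement) =====
-- stated objective: alternative
-- what changed: Replaces A's index-arithmetic loop (plus/side counters walking outward from the middle, building the result by repeated string concatenation) by slicing the word into a reversed left half and a right half, interleaving them with zip into a list, and joining once; the single leftover left char is appended for even lengths.
import Mathlib
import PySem

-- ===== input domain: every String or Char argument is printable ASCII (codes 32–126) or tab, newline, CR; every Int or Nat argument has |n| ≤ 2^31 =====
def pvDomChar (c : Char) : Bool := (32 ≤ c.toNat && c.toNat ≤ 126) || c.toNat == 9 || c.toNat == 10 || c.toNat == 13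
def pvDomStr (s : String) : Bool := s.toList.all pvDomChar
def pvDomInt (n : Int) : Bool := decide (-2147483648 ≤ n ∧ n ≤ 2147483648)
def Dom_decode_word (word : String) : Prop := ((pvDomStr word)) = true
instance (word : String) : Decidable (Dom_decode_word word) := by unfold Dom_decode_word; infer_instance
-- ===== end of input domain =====

-- B rebuilds the word by interleaving the reversed left half with the right half (zip),
-- instead of A's plus/side index arithmetic walking outward from the middle. Objective: alternative.

-- ===== PORT A =====
-- literal transliteration of A: running string, counters plus/side, indexing via pyGetD
-- (A raises IndexError only on the empty word, excluded by Pre_; all other accesses are in range).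
def decode_word (word : String) : String :=
  let cs := word.toList
  let ind : Int := PySem.Int.floordiv (PySem.List.len cs) 2
  let t0 : List Char := [PySem.List.pyGetD cs ind ' ']
  let step : (List Char × Int × Int) → Int → (List Char × Int × Int) :=
    fun st i =>
      let t := st.1 ++ [PySem.List.pyGetD cs (ind + st.2.1 * st.2.2) ' ']
      let plus := if PySem.Int.mod i 2 = 1 then st.2.1 + 1 else st.2.1
      (t, plus, st.2.2 * (-1))
  String.ofList ((PySem.List.pyRange 0 (PySem.List.len cs - 1) 1).foldl step (t0, 1, -1)).1

-- ===== PORT B =====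
-- literal transliteration of B (Source B): slices, zip-interleave, leftover left element.
def decode_word_alt (word : String) : String :=
  let cs := word.toList
  let ind := cs.length / 2
  let mid := PySem.List.pyGetD cs (ind : Int) ' '
  let left := (cs.take ind).reverse
  let right := cs.drop (ind + 1)
  let res := (left.zip right).foldl (fun acc p => acc ++ [p.1, p.2]) [mid]
  let res := if right.length < left.length then res ++ [PySem.List.pyGetD left (-1) ' '] else res
  String.ofList res

-- ===== PRECONDITION & SPEC =====
-- Pre_ excludes only the empty word, on which A (word[ind]) raises IndexError.
def Pre_decode_word (word : String) : Prop := word ≠ ""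
instance (word : String) : Decidable (Pre_decode_word word) := by unfold Pre_decode_word; infer_instance
def pvWitness_decode_word : String := "abcd"
def Spec_decode_word (word : String) (out : String) : Prop := out = decode_word_alt word
instance (word : String) (out : String) : Decidable (Spec_decode_word word out) := by unfold Spec_decode_word; infer_instance

-- ===== CLAIM (what is proved, stated in full; the proofs are below) =====
def Claim_equal_decode_word : Prop := ∀ (word : String), Dom_decode_word word → Pre_decode_word word → Spec_decode_word word (decode_word word)

-- ===== LEMMAS AND PROOFS =====

-- interleave: take alternately from l then r (stops when l is exhausted)
def ilv : List Char → List Char → List Char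
  | [], _ => []
  | a :: l, r => a :: ilv r l
termination_by l r => l.length + r.length
decreasing_by simp; omega

theorem ilv_length (l r : List Char) (h : r.length ≤ l.length ∧ l.length ≤ r.length + 1) :
    (ilv l r).length = l.length + r.length := by
  fun_induction ilv l r with
  | case1 r =>
    have : r = [] := List.length_eq_zero_iff.mp (Nat.le_zero.mp h.1)
    subst this; simp
  | case2 a l r ih =>
    simp at h ⊢
    rw [ih (by omega)]
    omega

theorem ilv_getD (l r : List Char) (h : r.length ≤ l.length ∧ l.length ≤ r.length + 1)
    (i : ℕ) (d : Char) :
    (ilv l r).getD i d = if i % 2 = 0 then l.getD (i / 2) d else r.getD (i / 2) d := by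
  fun_induction ilv l r generalizing i with
  | case1 r =>
    have : r = [] := List.length_eq_zero_iff.mp (Nat.le_zero.mp h.1)
    subst this; simp
  | case2 a l r ih =>
    have h' : l.length ≤ r.length ∧ r.length ≤ l.length + 1 := by
      simp at h; omega
    cases i with
    | zero => simp
    | succ i =>
      simp only [List.getD_cons_succ, ih h' i]
      by_cases hp : i % 2 = 0
      · have h1 : (i + 1) % 2 = 1 := by omega
        have h2 : (i + 1) / 2 = i / 2 := by omega
        simp [hp, h1, h2]
      · have h1 : (i + 1) % 2 = 0 := by omega
        have h2 : (i + 1) / 2 = i / 2 + 1 := by omega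
        simp [hp, h1, h2]

-- the element written at step i of either loop, as an index into cs
def seqf (cs : List Char) (i : ℕ) : Char :=
  if i % 2 = 0 then cs.getD (cs.length / 2 - (i / 2 + 1)) ' '
  else cs.getD (cs.length / 2 + (i / 2 + 1)) ' '

-- A's fold invariant
theorem A_fold (cs : List Char) (k : ℕ) (hk : k ≤ cs.length - 1) (hcs : cs ≠ []) :
    (PySem.List.pyRange 0 (k : Int) 1).foldl
      (fun st i =>
        (st.1 ++ [PySem.List.pyGetD cs ((cs.length / 2 : ℕ) + st.2.1 * st.2.2) ' '],
          if PySem.Int.mod i 2 = 1 then st.2.1 + 1 else st.2.1, st.2.2 * (-1)))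
      ([PySem.List.pyGetD cs ((cs.length / 2 : ℕ) : Int) ' '], 1, -1) =
    ([PySem.List.pyGetD cs ((cs.length / 2 : ℕ) : Int) ' '] ++ (List.range k).map (seqf cs),
      ((k / 2 : ℕ) : Int) + 1, if k % 2 = 0 then -1 else 1) := by
  induction k with
  | zero => simp [PySem.List.pyRange_one_eq_nil]
  | succ k ih =>
    have hn : 1 ≤ cs.length := List.length_pos_iff.mpr hcs
    have hk' : k ≤ cs.length - 1 := by omega
    have hcast : ((k + 1 : ℕ) : Int) = (k : Int) + 1 := by push_cast; ring
    rw [hcast, PySem.List.pyRange_one_succ_right (by positivity), List.foldl_append,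
      ih hk', List.foldl_cons, List.foldl_nil]
    simp only [Prod.mk.injEq]
    refine ⟨?_, ?_, ?_⟩
    · rw [List.range_succ, List.map_append, ← List.append_assoc]
      simp only [List.map_cons, List.map_nil]
      congr 2
      rcases Nat.mod_two_eq_zero_or_one k with hp | hp
      · have hb : k / 2 + 1 ≤ cs.length / 2 := by omega
        have : ((cs.length / 2 : ℕ) : Int) + ((k / 2 : ℕ) + 1) * (if k % 2 = 0 then (-1 : Int) else 1)
            = ((cs.length / 2 - (k / 2 + 1) : ℕ) : Int) := by
          rw [if_pos hp]; omega
        rw [this, PySem.List.pyGetD_natCast]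
        simp [seqf, hp]
      · have : ((cs.length / 2 : ℕ) : Int) + ((k / 2 : ℕ) + 1) * (if k % 2 = 0 then (-1 : Int) else 1)
            = ((cs.length / 2 + (k / 2 + 1) : ℕ) : Int) := by
          rw [if_neg (by omega)]; omega
        rw [this, PySem.List.pyGetD_natCast]
        simp [seqf, hp]
    · rcases Nat.mod_two_eq_zero_or_one k with hp | hp <;> simp [hp] <;> omega
    · rcases Nat.mod_two_eq_zero_or_one k with hp | hp <;> simp [hp] <;> omega

-- the range-map view equals the interleave view
theorem seq_eq_ilv (cs : List Char) (hcs : cs ≠ []) :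
    (List.range (cs.length - 1)).map (seqf cs) =
    ilv ((cs.take (cs.length / 2)).reverse) (cs.drop (cs.length / 2 + 1)) := by
  have hn : 1 ≤ cs.length := List.length_pos_iff.mpr hcs
  have hlenl : ((cs.take (cs.length / 2)).reverse).length = cs.length / 2 := by
    simp; omega
  have hlenr : (cs.drop (cs.length / 2 + 1)).length = cs.length - (cs.length / 2 + 1) := by
    simp
  have hhyp : (cs.drop (cs.length / 2 + 1)).length ≤ ((cs.take (cs.length / 2)).reverse).length ∧
      ((cs.take (cs.length / 2)).reverse).length ≤ (cs.drop (cs.length / 2 + 1)).length + 1 := by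
    rw [hlenl, hlenr]; omega
  apply List.ext_getElem
  · rw [List.length_map, List.length_range, ilv_length _ _ hhyp, hlenl, hlenr]; omega
  · intro i h1 h2
    have h1' : i < cs.length - 1 := by simpa using h1
    rw [List.getElem_map, List.getElem_range, ← List.getD_eq_getElem _ ' ' h2,
      ilv_getD _ _ hhyp]
    unfold seqf
    rcases Nat.mod_two_eq_zero_or_one i with hp | hp
    · rw [if_pos hp, if_pos hp]
      have hj : i / 2 < cs.length / 2 := by omega
      rw [List.getD_eq_getElem _ ' ' (by omega : cs.length / 2 - (i / 2 + 1) < cs.length),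
        List.getD_eq_getElem _ ' ' (by rw [hlenl]; omega)]
      rw [List.getElem_reverse, List.getElem_take]
      congr 1
      simp
      omega
    · rw [if_neg (by omega), if_neg (by omega)]
      have hj : i / 2 < cs.length - (cs.length / 2 + 1) := by omega
      rw [List.getD_eq_getElem _ ' ' (by omega : cs.length / 2 + (i / 2 + 1) < cs.length),
        List.getD_eq_getElem _ ' ' (by rw [hlenr]; omega)]
      rw [List.getElem_drop]
      congr 1
      omega

-- B's zip loop (plus leftover) computes the interleave
theorem B_fold (l r : List Char) (acc : List Char)
    (h : r.length ≤ l.length ∧ l.length ≤ r.length + 1) :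
    (if r.length < l.length
      then (l.zip r).foldl (fun acc p => acc ++ [p.1, p.2]) acc ++ [PySem.List.pyGetD l (-1) ' ']
      else (l.zip r).foldl (fun acc p => acc ++ [p.1, p.2]) acc) = acc ++ ilv l r := by
  induction l generalizing r acc with
  | nil =>
    have : r = [] := List.length_eq_zero_iff.mp (by simpa using h.1)
    subst this; simp [ilv]
  | cons a l ih =>
    cases r with
    | nil =>
      have hl : l = [] := by simpa using h.2
      subst hl
      rw [PySem.List.pyGetD_neg_ofNat [a] 1 ' ' (by omega) (by simp)]
      simp [ilv]
    | cons b r =>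
      have h' : r.length ≤ l.length ∧ l.length ≤ r.length + 1 := by simp at h; omega
      have ihh := ih r (acc ++ [a, b]) h'
      simp only [List.zip_cons_cons, List.foldl_cons, List.length_cons,
        add_lt_add_iff_right]
      rw [ilv, ilv]
      by_cases hc : r.length < l.length
      · have hl : l ≠ [] := by intro e; subst e; simp at hc
        rw [if_pos hc] at ihh ⊢
        have hlast : PySem.List.pyGetD (a :: l) (-1) ' ' = PySem.List.pyGetD l (-1) ' ' := by
          rw [PySem.List.pyGetD_neg_ofNat (a :: l) 1 ' ' (by omega) (by simp),
            PySem.List.pyGetD_neg_ofNat l 1 ' ' (by omega)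
              (by simpa using Nat.one_le_iff_ne_zero.mpr (by simpa using hl))]
          have hlpos : 0 < l.length := List.length_pos_iff.mpr hl
          simp only [List.length_cons, Nat.add_sub_cancel]
          rw [List.getElem_cons]
          simp [Nat.pos_iff_ne_zero.mp hlpos]
        rw [hlast, ihh]
        simp
      · rw [if_neg hc] at ihh ⊢
        rw [ihh]
        simp

-- ===== VERDICT (by name: the statement is the Claim_ definition above) =====
theorem decode_word_spec : Claim_equal_decode_word := by
  intro word _ hpre
  unfold Spec_decode_word
  have hcs : word.toList ≠ [] := by
    intro e
    apply hpre
    simpa using congrArg String.ofList e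
  have hn : 1 ≤ word.toList.length := List.length_pos_iff.mpr hcs
  simp only [decode_word, decode_word_alt, PySem.List.len_eq]
  have hfd : PySem.Int.floordiv ((word.toList.length : ℕ) : Int) 2
      = ((word.toList.length / 2 : ℕ) : Int) := by
    exact_mod_cast PySem.Int.floordiv_natCast word.toList.length 2
  have hb : ((word.toList.length : ℕ) : Int) - 1 = ((word.toList.length - 1 : ℕ) : Int) := by
    omega
  rw [hfd, hb, A_fold word.toList (word.toList.length - 1) le_rfl hcs,
    B_fold _ _ _ ⟨by simp; omega, by simp; omega⟩]
  rw [seq_eq_ilv word.toList hcs]
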